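-- pv_equiv track=rewrite | github.com/PrasannaIITM/CS6630---Secure-Processor-Microarchitecture | fault-attacks-on-AES/dfa_8.py | XTIME
-- ===== SOURCE A (Python) =====
-- def XTIME(a,n=1):
--     for i in range(n):
--         if a & 0x80:
--             a = a << 1
--             a ^= 0x1B
--         else:
--             a = a << 1
--     return a & 0xFF
-- ===== SOURCE B (Python) =====
-- # GF(2^8) log/antilog tables (generator 0x03, AES polynomial 0x11B), built once.
-- EXP = [0] * 255
-- LOG = [0] * 256
-- _x = 1
-- for _i in range(255):
--     EXP[_i] = _x
--     LOG[_x] = _i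
--     _x = (_x ^ (_x << 1) ^ (0x1B if _x & 0x80 else 0)) & 0xFF  # multiply by 0x03
--
--
-- def XTIME(a, n=1):
--     m = a & 0xFF
--     if n <= 0 or m == 0:
--         return m
--     return EXP[(LOG[m] + 25 * n) % 255]  # 25 = LOG[0x02]
-- ===== Notes on version B (the rewrite author's own statement) =====
-- stated objective: faster
-- what changed: Replaced the n-iteration shift/xor xtime loop by a one-time GF(2^8) log/antilog table build (generator 0x03) and a single O(1) lookup EXP[(LOG[a&0xFF]+25*n)%255], with direct returns for n<=0 or a&0xFF==0.
import Mathlib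
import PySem

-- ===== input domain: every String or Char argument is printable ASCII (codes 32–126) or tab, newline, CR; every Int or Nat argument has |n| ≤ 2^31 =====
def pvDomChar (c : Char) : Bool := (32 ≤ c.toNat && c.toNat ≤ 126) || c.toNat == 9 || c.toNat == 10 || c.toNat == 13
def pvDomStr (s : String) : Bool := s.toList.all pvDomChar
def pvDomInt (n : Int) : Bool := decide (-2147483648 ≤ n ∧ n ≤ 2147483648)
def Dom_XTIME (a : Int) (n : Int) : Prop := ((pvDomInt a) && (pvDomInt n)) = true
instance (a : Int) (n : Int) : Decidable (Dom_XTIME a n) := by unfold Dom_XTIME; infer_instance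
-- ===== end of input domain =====

set_option maxRecDepth 100000


-- B replaces A's n-iteration xtime loop by one GF(2^8) log/antilog table lookup (O(1) body after a one-time table build).

-- ===== PORT A =====
-- literal port of Source A: repeat the shift/xor step n times, mask to a byte at the end
def XTIME (a : Int) (n : Int) : Int :=
  let r := (PySem.List.pyRange 0 n 1).foldl
    (fun a (_i : Int) =>
      if PySem.Int.band a 128 ≠ 0 then PySem.Int.bxor (a <<< (1 : Nat)) 27
      else a <<< (1 : Nat)) a
  PySem.Int.band r 255

-- ===== PORT B =====
-- port of Source B's module-level table build: EXP/LOG lists filled by 255 multiply-by-0x03 steps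
def pvTables : List Int × List Int :=
  let s := (PySem.List.pyRange 0 255 1).foldl
    (fun (s : List Int × List Int × Int) (i : Int) =>
      let e := s.1
      let l := s.2.1
      let x := s.2.2
      (e.set i.toNat x, l.set x.toNat i,
        PySem.Int.band (PySem.Int.bxor (PySem.Int.bxor x (x <<< (1 : Nat)))
          (if PySem.Int.band x 128 ≠ 0 then 27 else 0)) 255))
    (List.replicate 255 0, List.replicate 256 0, 1)
  (s.1, s.2.1)

-- list indexing ported via pyGetD with default 0: the indices Source B uses are always in range
def XTIME_alt (a : Int) (n : Int) : Int :=
  let m := PySem.Int.band a 255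
  if n ≤ 0 ∨ m = 0 then m
  else PySem.List.pyGetD pvTables.1
        (PySem.Int.mod (PySem.List.pyGetD pvTables.2 m 0 + 25 * n) 255) 0

-- ===== PRECONDITION & SPEC =====
def Spec_XTIME (a : Int) (n : Int) (out : Int) : Prop := out = XTIME_alt a n
instance (a : Int) (n : Int) (out : Int) : Decidable (Spec_XTIME a n out) := by unfold Spec_XTIME; infer_instance

-- ===== CLAIM (what is proved, stated in full; the proofs are below) =====
def Claim_equal_XTIME : Prop := ∀ (a : Int) (n : Int), Dom_XTIME a n → Spec_XTIME a n (XTIME a n)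

-- ===== LEMMAS AND PROOFS =====

def pvLow (b : Int) : Nat := (b % 256).toNat
def pvH (m : Nat) : Nat := if 128 ≤ m then (2 * m) % 256 ^^^ 27 else (2 * m) % 256
def pvStepA (b : Int) : Int :=
  if PySem.Int.band b 128 ≠ 0 then PySem.Int.bxor (b <<< (1 : Nat)) 27 else b <<< (1 : Nat)

def pvExpN : List Nat := [1, 3, 5, 15, 17, 51, 85, 255, 26, 46, 114, 150, 161, 248, 19, 53, 95, 225, 56, 72, 216, 115, 149, 164, 247, 2, 6, 10, 30, 34, 102, 170, 229, 52, 92, 228, 55, 89, 235, 38, 106, 190, 217, 112, 144, 171, 230, 49, 83, 245, 4, 12, 20, 60, 68, 204, 79, 209, 104, 184, 211, 110, 178, 205, 76, 212, 103, 169, 224, 59, 77, 215, 98, 166, 241, 8, 24, 40, 120, 136, 131, 158, 185, 208, 107, 189, 220, 127, 129, 152, 179, 206, 73, 219, 118, 154, 181, 196, 87, 249, 16, 48, 80, 240, 11, 29, 39, 105, 187, 214, 97, 163, 254, 25, 43, 125, 135, 146, 173, 236, 47, 113, 147, 174, 233, 32, 96, 160, 251, 22, 58, 78, 210, 109, 183,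 194, 93, 231, 50, 86, 250, 21, 63, 65, 195, 94, 226, 61, 71, 201, 64, 192, 91, 237, 44, 116, 156, 191, 218, 117, 159, 186, 213, 100, 172, 239, 42, 126, 130, 157, 188, 223, 122, 142, 137, 128, 155, 182, 193, 88, 232, 35, 101, 175, 234, 37, 111, 177, 200, 67, 197, 84, 252, 31, 33, 99, 165, 244, 7, 9, 27, 45, 119, 153, 176, 203, 70, 202, 69, 207, 74, 222, 121, 139, 134, 145, 168, 227, 62, 66, 198, 81, 243, 14, 18, 54, 90, 238, 41, 123, 141, 140, 143, 138, 133, 148, 167, 242, 13, 23, 57, 75, 221, 124, 132, 151, 162, 253, 28, 36, 108, 180, 199, 82, 246]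

def pvLogN : List Nat := [0, 0, 25, 1, 50, 2, 26, 198, 75, 199, 27, 104, 51, 238, 223, 3, 100, 4, 224, 14, 52, 141, 129, 239, 76, 113, 8, 200, 248, 105, 28, 193, 125, 194, 29, 181, 249, 185, 39, 106, 77, 228, 166, 114, 154, 201, 9, 120, 101, 47, 138, 5, 33, 15, 225, 36, 18, 240, 130, 69, 53, 147, 218, 142, 150, 143, 219, 189, 54, 208, 206, 148, 19, 92, 210, 241, 64, 70, 131, 56, 102, 221, 253, 48, 191, 6, 139, 98, 179, 37, 226, 152, 34, 136, 145, 16, 126, 110, 72, 195, 163, 182, 30, 66, 58, 107, 40, 84, 250, 133, 61, 186, 43, 121, 10, 21, 155, 159, 94, 202, 78, 212, 172, 229, 243, 115, 167, 87, 175, 88, 168, 80, 244, 234, 214, 116, 79, 174, 233, 213, 231, 230, 173, 232, 44, 215, 117, 122, 235, 22, 11, 245, 89, 203, 95, 176, 156, 169, 81, 160, 127, 12, 246, 111, 23, 196, 73, 236, 216, 67, 31, 45, 164, 118, 123, 183, 204, 187, 62, 90, 251, 96, 177, 134, 59, 82, 161, 108, 170, 85, 41, 157, 151, 178, 135, 144,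 97, 190, 220, 252, 188, 149, 207, 205, 55, 63, 91, 209, 83, 57, 132, 60, 65, 162, 109, 71, 20, 42, 158, 93, 86, 242, 211, 171, 68, 17, 146, 217, 35, 32, 46, 137, 180, 124, 184, 38, 119, 153, 227, 165, 103, 74, 237, 222, 197, 49, 254, 24, 13, 99, 140, 128, 192, 247, 112, 7]

lemma pv_and255 (x : Nat) : x &&& 255 = x % 256 := by
  have h := Nat.and_two_pow_sub_one_eq_mod x 8
  norm_num at h
  exact h

lemma pv_and128 (x : Nat) : x &&& 128 = (x % 256) &&& 128 := by
  have h : (255 : Nat) &&& 128 = 128 := by decide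
  rw [← pv_and255, Nat.and_assoc, h]

lemma pv_and128_small : ∀ r : Nat, r < 256 → r &&& 128 = if r < 128 then 0 else 128 := by decide

lemma pv_xor27_mod (x : Nat) : (x ^^^ 27) % 256 = (x % 256) ^^^ 27 := by
  have h27 : (27 : Nat) &&& 255 = 27 := by decide
  rw [← pv_and255, ← pv_and255, Nat.and_xor_distrib_right, h27]

lemma pv_xor27_compl : ∀ r : Nat, r < 256 → 255 - (r ^^^ 27) = (255 - r) ^^^ 27 := by decide

lemma pv_band255 (a : Int) : PySem.Int.band a 255 = ((a % 256).toNat : Int) := by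
  unfold PySem.Int.band
  norm_num
  simp only [show Int.toNat 255 = 255 from rfl]
  split_ifs with h
  · rw [pv_and255]; omega
  · rw [Nat.and_comm, pv_and255]; omega

lemma pv_band128 (a : Int) : (PySem.Int.band a 128 ≠ 0) ↔ 128 ≤ pvLow a := by
  unfold PySem.Int.band pvLow
  norm_num
  simp only [show Int.toNat 128 = 128 from rfl]
  split_ifs with h
  · rw [pv_and128, pv_and128_small _ (Nat.mod_lt _ (by omega))]
    split_ifs with h2 <;> omega
  · rw [Nat.and_comm, pv_and128, pv_and128_small _ (Nat.mod_lt _ (by omega))]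
    split_ifs with h2 <;> omega

lemma pv_low_shift (b : Int) : pvLow (b <<< (1 : Nat)) = (2 * pvLow b) % 256 := by
  unfold pvLow
  rw [Int.shiftLeft_eq]
  omega

lemma pv_low_xor27 (b : Int) : pvLow (PySem.Int.bxor b 27) = pvLow b ^^^ 27 := by
  unfold pvLow PySem.Int.bxor
  norm_num
  simp only [show Int.toNat 27 = 27 from rfl]
  split_ifs with h
  · have e0 : (b % 256).toNat = b.toNat % 256 := by omega
    rw [e0, ← pv_xor27_mod]
    omega
  · have e3 : ((-((((-b).toNat - 1 ^^^ 27 : Nat) : Int)) - 1) % 256).toNat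
        = 255 - (((-b).toNat - 1 ^^^ 27) % 256) := by omega
    have e1 : (b % 256).toNat = 255 - ((-b).toNat - 1) % 256 := by omega
    rw [e3, pv_xor27_mod, e1]
    exact pv_xor27_compl _ (Nat.mod_lt _ (by omega))

lemma pv_lowStepA (b : Int) : pvLow (pvStepA b) = pvH (pvLow b) := by
  unfold pvStepA pvH
  by_cases hc : PySem.Int.band b 128 ≠ 0
  · rw [if_pos hc, pv_low_xor27, pv_low_shift,
      if_pos (show 128 ≤ pvLow b from (pv_band128 b).mp hc)]
  · rw [if_neg hc, pv_low_shift,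
      if_neg (show ¬128 ≤ pvLow b from fun h => hc ((pv_band128 b).mpr h))]

lemma pv_iterLow (k : Nat) (b : Int) : pvLow (pvStepA^[k] b) = pvH^[k] (pvLow b) := by
  induction k generalizing b with
  | zero => rfl
  | succ k ih =>
    rw [Function.iterate_succ_apply', Function.iterate_succ_apply', pv_lowStepA, ih]

lemma pv_iterZero (k : Nat) : pvH^[k] 0 = 0 := by
  induction k with
  | zero => rfl
  | succ k ih => rw [Function.iterate_succ_apply', ih]; decide

lemma pv_foldl_const (l : List Int) (g : Int → Int) (x : Int) :
    List.foldl (fun s (_ : Int) => g s) x l = g^[l.length] x := by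
  induction l generalizing x with
  | nil => rfl
  | cons h t ih => simp [List.foldl, ih, Function.iterate_succ_apply]

lemma pv_tables_eq :
    pvTables = (pvExpN.map (fun k => (k : Int)), pvLogN.map (fun k => (k : Int))) := by
  decide

lemma pv_F1 : ∀ l : Nat, l < 255 →
    pvH (pvExpN.getD l 0) = pvExpN.getD ((l + 25) % 255) 0 := by decide

lemma pv_F2 : ∀ m : Nat, m < 256 → 0 < m →
    pvExpN.getD (pvLogN.getD m 0) 0 = m ∧ pvLogN.getD m 0 < 255 := by decide

lemma pv_iterTab (k m : Nat) (h1 : 0 < m) (h2 : m < 256) :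
    pvH^[k] m = pvExpN.getD ((pvLogN.getD m 0 + 25 * k) % 255) 0 := by
  induction k with
  | zero =>
    obtain ⟨he, hl⟩ := pv_F2 m h2 h1
    simp only [Function.iterate_zero, id_eq, Nat.mul_zero, Nat.add_zero, Nat.mod_eq_of_lt hl]
    exact he.symm
  | succ k ih =>
    rw [Function.iterate_succ_apply', ih, pv_F1 _ (Nat.mod_lt _ (by omega))]
    congr 1
    omega

lemma pv_getD_map (xs : List Nat) (k : Nat) :
    (xs.map (fun t => (t : Int))).getD k 0 = ((xs.getD k 0 : Nat) : Int) := by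
  induction xs generalizing k with
  | nil => rfl
  | cons h t ih => cases k with
    | zero => rfl
    | succ k => simpa using ih k

lemma pv_pyGetD_cast (xs : List Nat) (k : Nat) :
    PySem.List.pyGetD (xs.map (fun t => (t : Int))) (k : Int) 0 = ((xs.getD k 0 : Nat) : Int) := by
  rw [PySem.List.pyGetD_of_nonneg _ _ (by omega), Int.toNat_natCast, pv_getD_map]

lemma pv_mod_cast (x : Nat) : PySem.Int.mod (x : Int) 255 = ((x % 255 : Nat) : Int) := by
  unfold PySem.Int.mod
  rw [Int.fmod_eq_emod]
  norm_num

lemma pv_XTIME_eq (a : Int) (n : Int) :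
    XTIME a n = ((pvH^[n.toNat] (pvLow a) : Nat) : Int) := by
  show PySem.Int.band
    ((PySem.List.pyRange 0 n 1).foldl (fun s (_ : Int) => pvStepA s) a) 255 = _
  rw [pv_foldl_const, PySem.List.length_pyRange_one, pv_band255]
  rw [show (n - 0).toNat = n.toNat from by omega, ← pv_iterLow]
  rfl

-- ===== VERDICT (by name: the statement is the Claim_ definition above) =====
theorem XTIME_spec : Claim_equal_XTIME := by
  intro a n _
  unfold Spec_XTIME
  rw [pv_XTIME_eq]
  simp only [XTIME_alt, pv_band255, pv_tables_eq]
  by_cases hn : n ≤ 0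
  · rw [if_pos (Or.inl hn), show n.toNat = 0 from by omega]
    rfl
  · by_cases hm : (a % 256).toNat = 0
    · rw [if_pos (Or.inr (by rw [hm]; rfl))]
      rw [show pvLow a = 0 from hm, pv_iterZero, hm]
    · rw [if_neg (by simp only [not_or]; exact ⟨hn, by exact_mod_cast hm⟩)]
      rw [show ((a % 256).toNat : Int) = ((pvLow a : Nat) : Int) from rfl, pv_pyGetD_cast]
      rw [show ((pvLogN.getD (pvLow a) 0 : Nat) : Int) + 25 * n
            = ((pvLogN.getD (pvLow a) 0 + 25 * n.toNat : Nat) : Int) from by push_cast; omega]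
      rw [pv_mod_cast, pv_pyGetD_cast]
      rw [pv_iterTab n.toNat (pvLow a) (by unfold pvLow; omega) (by unfold pvLow; omega)]
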